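-- pv_equiv track=rewrite | github.com/ucscCancer/pathway_tools | scripts/mPathway.py | getComponentMap
-- ===== SOURCE A (Python) =====
-- def getComponentMap(pNodes, pInteractions):
--     """create the dictionary componentMap from interaction map"""
--     rpInteractions = reverseInteractions(pInteractions)
--     componentMap = dict()
--     for i in pNodes.keys():
--         if pNodes[i] != "complex":
--             continue
--         componentMap[i] = []
--         if i not in rpInteractions:
--             continue
--         for j in rpInteractions[i]:
--             if rpInteractions[i][j] == "component>":
--                 componentMap[i].append(j)
--     return(componentMap)
--
-- def reverseInteractions(pInteractions):
--     """reverse interaction mapping"""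
--     rpInteractions = dict()
--     for i in pInteractions.keys():
--         for j in pInteractions[i].keys():
--             if j not in rpInteractions:
--                 rpInteractions[j] = dict()
--             rpInteractions[j][i] = pInteractions[i][j]
--     return(rpInteractions)
-- ===== SOURCE B (Python) =====
-- def getComponentMap(pNodes, pInteractions):
--     """create the dictionary componentMap from interaction map"""
--     componentMap = {n: [] for n, t in pNodes.items() if t == "complex"}
--     for i in pInteractions:
--         for j, v in pInteractions[i].items():
--             if v == "component>" and j in componentMap:
--                 componentMap[j].append(i)
--     return componentMap
-- ===== Notes on version B (the rewrite author's own statement) =====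
-- stated objective: simpler
-- what changed: Drops the reverseInteractions pass entirely: B initialises an entry for every 'complex' node and then fills the entries in one forward pass over pInteractions, instead of first materialising the whole reversed interaction map and then scanning it per complex node.
import Mathlib
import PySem

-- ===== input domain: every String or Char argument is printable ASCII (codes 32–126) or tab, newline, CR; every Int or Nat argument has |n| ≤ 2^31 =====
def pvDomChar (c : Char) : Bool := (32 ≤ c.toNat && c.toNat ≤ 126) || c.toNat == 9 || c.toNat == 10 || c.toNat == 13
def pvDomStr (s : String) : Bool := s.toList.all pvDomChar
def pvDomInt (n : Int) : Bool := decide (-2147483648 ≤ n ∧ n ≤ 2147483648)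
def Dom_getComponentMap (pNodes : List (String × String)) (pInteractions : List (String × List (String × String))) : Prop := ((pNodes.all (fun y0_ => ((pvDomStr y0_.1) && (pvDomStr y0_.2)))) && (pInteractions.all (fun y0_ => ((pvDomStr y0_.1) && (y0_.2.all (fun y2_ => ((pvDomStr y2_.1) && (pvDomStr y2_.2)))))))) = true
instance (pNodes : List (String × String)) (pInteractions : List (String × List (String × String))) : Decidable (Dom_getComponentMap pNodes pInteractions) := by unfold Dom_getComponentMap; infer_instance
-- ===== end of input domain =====

-- B drops A's reverseInteractions pass and instead fills the complex entries in one forward pass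
-- over the interactions (objective: simpler); return values proved equal.

-- ===== PORT A =====
-- the Python dict parameters arrive as association lists; PySem.Dict.ofList rebuilds the Python
-- dicts (last value wins, a key keeps its first position) exactly as dict() does.
def reverseInteractions (pI : PySem.Dict String (PySem.Dict String String)) : PySem.Dict String (PySem.Dict String String) :=
  pI.items.foldl (fun r p =>
    p.2.items.foldl (fun r q =>
      let r1 := if r.contains q.1 then r else r.insert q.1 PySem.Dict.empty
      r1.insert q.1 ((r1.getD q.1 PySem.Dict.empty).insert p.1 q.2)) r) PySem.Dict.empty

def getComponentMap (pNodes : List (String × String)) (pInteractions : List (String × List (String × String))) : List (String × List String) :=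
  let pN : PySem.Dict String String := PySem.Dict.ofList pNodes
  let pI : PySem.Dict String (PySem.Dict String String) :=
    PySem.Dict.ofList (pInteractions.map (fun p => (p.1, PySem.Dict.ofList p.2)))
  let rp := reverseInteractions pI
  let cm := pN.items.foldl (fun cm p =>
    if p.2 != "complex" then cm
    else
      let cm1 := cm.insert p.1 ([] : List String)
      match rp.get? p.1 with
      | none => cm1
      | some d => d.items.foldl (fun cm q =>
          if q.2 == "component>" then cm.modify p.1 [] (fun xs => xs ++ [q.1]) else cm) cm1) PySem.Dict.empty
  cm.items

-- ===== PORT B =====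
def getComponentMap_alt (pNodes : List (String × String)) (pInteractions : List (String × List (String × String))) : List (String × List String) :=
  let pN : PySem.Dict String String := PySem.Dict.ofList pNodes
  let pI : PySem.Dict String (PySem.Dict String String) :=
    PySem.Dict.ofList (pInteractions.map (fun p => (p.1, PySem.Dict.ofList p.2)))
  let cm0 : PySem.Dict String (List String) :=
    PySem.Dict.ofList ((pN.items.filter (fun p => p.2 == "complex")).map (fun p => (p.1, ([] : List String))))
  let cm := pI.items.foldl (fun cm p =>
    p.2.items.foldl (fun cm q =>
      if q.2 == "component>" && cm.contains q.1 then cm.modify q.1 [] (fun xs => xs ++ [p.1]) else cm) cm) cm0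
  cm.items

-- ===== PRECONDITION & SPEC =====
def Spec_getComponentMap (pNodes : List (String × String)) (pInteractions : List (String × List (String × String))) (out : List (String × List String)) : Prop := out = getComponentMap_alt pNodes pInteractions
instance (pNodes : List (String × String)) (pInteractions : List (String × List (String × String))) (out : List (String × List String)) : Decidable (Spec_getComponentMap pNodes pInteractions out) := by unfold Spec_getComponentMap; infer_instance

-- ===== CLAIM (what is proved, stated in full; the proofs are below) =====
def Claim_equal_getComponentMap : Prop := ∀ (pNodes : List (String × String)) (pInteractions : List (String × List (String × String))), Dom_getComponentMap pNodes pInteractions → Spec_getComponentMap pNodes pInteractions (getComponentMap pNodes pInteractions)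

-- ===== LEMMAS AND PROOFS =====

-- sources of a node c: the interaction keys i (in order) with pInteractions[i][c] == "component>"
def pvSrcs (L : List (String × PySem.Dict String String)) (c : String) : List String :=
  (L.filter (fun p => p.2.get? c == some "component>")).map (·.1)

def pvOptItems (o : Option (PySem.Dict String String)) : List (String × String) :=
  (o.map PySem.Dict.items).getD []

-- what A reads off the reversed map for node c
def pvRpSrcs (rp : PySem.Dict String (PySem.Dict String String)) (c : String) : List String :=
  match rp.get? c with
  | none => []
  | some d => (d.items.filter (fun q => q.2 == "component>")).map (·.1)

theorem L1_AinnerGetD (M : List (String × String)) (cm : PySem.Dict String (List String)) (c : String) :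
    (M.foldl (fun cm q => if q.2 == "component>" then cm.modify c [] (fun xs => xs ++ [q.1]) else cm) cm).getD c []
      = cm.getD c [] ++ (M.filter (fun q => q.2 == "component>")).map (·.1) := by
  induction M generalizing cm with
  | nil => simp
  | cons q M ih =>
    by_cases h : q.2 == "component>"
    · simp only [List.foldl_cons, List.filter_cons, h, if_pos, ih, PySem.Dict.getD_modify_self]
      simp [h]
    · simp only [List.foldl_cons, List.filter_cons, h, if_neg, ih]
      simp [h]

theorem L1b_AinnerGetD_ne (M : List (String × String)) (cm : PySem.Dict String (List String)) (c c' : String) (h : c' ≠ c) :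
    (M.foldl (fun cm q => if q.2 == "component>" then cm.modify c [] (fun xs => xs ++ [q.1]) else cm) cm).getD c' []
      = cm.getD c' [] := by
  induction M generalizing cm with
  | nil => rfl
  | cons q M ih =>
    simp only [List.foldl_cons]
    split
    · rw [ih, PySem.Dict.getD_modify_of_ne _ _ _ h]
    · exact ih cm

theorem L1c_AinnerContains (M : List (String × String)) (cm : PySem.Dict String (List String)) (c c' : String)
    (h : cm.contains c = true) :
    (M.foldl (fun cm q => if q.2 == "component>" then cm.modify c [] (fun xs => xs ++ [q.1]) else cm) cm).contains c'
      = cm.contains c' := by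
  induction M generalizing cm with
  | nil => rfl
  | cons q M ih =>
    simp only [List.foldl_cons]
    split
    · rw [ih _ (by simp [PySem.Dict.contains_modify, h]), PySem.Dict.contains_modify]
      rcases eq_or_ne c' c with rfl | hne
      · simp [h]
      · simp [hne]
    · exact ih cm h

theorem L1k_AinnerKeys (M : List (String × String)) (cm : PySem.Dict String (List String)) (c : String)
    (h : cm.contains c = true) :
    (M.foldl (fun cm q => if q.2 == "component>" then cm.modify c [] (fun xs => xs ++ [q.1]) else cm) cm).keys
      = cm.keys := by
  induction M generalizing cm with
  | nil => rfl
  | cons q M ih =>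
    simp only [List.foldl_cons]
    split
    · rw [ih _ (by simp [PySem.Dict.contains_modify, h]), PySem.Dict.keys_modify,
        PySem.Dict.keys_insert_of_contains _ _ h]
    · exact ih cm h

theorem L2_AouterGetD_ne (rp : PySem.Dict String (PySem.Dict String String))
    (L : List (String × String)) (cm : PySem.Dict String (List String)) (c : String)
    (h : c ∉ L.map (·.1)) :
    (L.foldl (fun cm p =>
      if p.2 != "complex" then cm
      else
        let cm1 := cm.insert p.1 ([] : List String)
        match rp.get? p.1 with
        | none => cm1
        | some d => d.items.foldl (fun cm q =>
            if q.2 == "component>" then cm.modify p.1 [] (fun xs => xs ++ [q.1]) else cm) cm1) cm).getD c []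
      = cm.getD c [] := by
  induction L generalizing cm with
  | nil => rfl
  | cons p L ih =>
    simp only [List.map_cons, List.mem_cons, not_or] at h
    obtain ⟨h1, h2⟩ := h
    simp only [List.foldl_cons]
    split
    · exact ih _ h2
    · split
      · rw [ih _ h2, PySem.Dict.getD_insert_of_ne _ _ _ h1]
      · rw [ih _ h2, L1b_AinnerGetD_ne _ _ _ _ h1, PySem.Dict.getD_insert_of_ne _ _ _ h1]

theorem L4_AouterGetD (rp : PySem.Dict String (PySem.Dict String String))
    (L : List (String × String)) (cm : PySem.Dict String (List String)) (c : String)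
    (hnd : (L.map (·.1)).Nodup) (hc : cm.contains c = false) :
    (L.foldl (fun cm p =>
      if p.2 != "complex" then cm
      else
        let cm1 := cm.insert p.1 ([] : List String)
        match rp.get? p.1 with
        | none => cm1
        | some d => d.items.foldl (fun cm q =>
            if q.2 == "component>" then cm.modify p.1 [] (fun xs => xs ++ [q.1]) else cm) cm1) cm).getD c []
      = if (c, "complex") ∈ L then pvRpSrcs rp c else [] := by
  induction L generalizing cm with
  | nil => simp [PySem.Dict.getD_of_not_contains _ _ hc]
  | cons p L ih =>
    obtain ⟨a, b⟩ := p
    simp only [List.map_cons, List.nodup_cons] at hnd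
    obtain ⟨hp, hnd'⟩ := hnd
    simp only [List.foldl_cons]
    by_cases hpc : a = c
    · subst hpc
      have hcL : (a, "complex") ∉ L := fun hm => hp (List.mem_map.mpr ⟨_, hm, rfl⟩)
      by_cases hcplx : b = "complex"
      · subst hcplx
        have hmem : (a, "complex") ∈ (a, "complex") :: L := List.mem_cons_self
        rw [if_pos hmem]
        simp only [bne_self_eq_false, Bool.false_eq_true, if_false]
        cases hrp : rp.get? a with
        | none =>
          simp only [hrp]
          rw [L2_AouterGetD_ne _ _ _ _ hp, PySem.Dict.getD_insert_self]
          simp [pvRpSrcs, hrp]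
        | some d =>
          simp only [hrp]
          rw [L2_AouterGetD_ne _ _ _ _ hp, L1_AinnerGetD, PySem.Dict.getD_insert_self]
          simp [pvRpSrcs, hrp]
      · have hmem : (a, "complex") ∉ (a, b) :: L := by
          intro hm
          rcases List.mem_cons.mp hm with hm | hm
          · exact hcplx (congrArg Prod.snd hm).symm
          · exact hcL hm
        rw [if_neg hmem]
        have hgate : ((a, b).2 != "complex") = true := by simp [hcplx]
        rw [if_pos hgate]
        rw [L2_AouterGetD_ne _ _ _ _ hp, PySem.Dict.getD_of_not_contains _ _ hc]
    · have hcne : c ≠ a := fun h => hpc h.symm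
      have hmem : ((c, "complex") ∈ (a, b) :: L) ↔ ((c, "complex") ∈ L) := by
        rw [List.mem_cons]
        constructor
        · rintro (hm | hm)
          · exact absurd (congrArg Prod.fst hm) hcne
          · exact hm
        · exact fun hm => Or.inr hm
      rw [if_congr hmem rfl rfl]
      split
      · exact ih _ hnd' hc
      · have hc1 : (cm.insert a ([] : List String)).contains c = false := by
          rw [PySem.Dict.contains_insert]
          simp [hc, hcne]
        split
        · exact ih _ hnd' hc1
        · rw [ih _ hnd' (by rw [L1c_AinnerContains _ _ _ _ (by simp [PySem.Dict.contains_insert])]; exact hc1)]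

theorem L5_AouterKeys (rp : PySem.Dict String (PySem.Dict String String))
    (L : List (String × String)) (cm : PySem.Dict String (List String))
    (hnd : (L.map (·.1)).Nodup) (hfresh : ∀ p ∈ L, cm.contains p.1 = false) :
    (L.foldl (fun cm p =>
      if p.2 != "complex" then cm
      else
        let cm1 := cm.insert p.1 ([] : List String)
        match rp.get? p.1 with
        | none => cm1
        | some d => d.items.foldl (fun cm q =>
            if q.2 == "component>" then cm.modify p.1 [] (fun xs => xs ++ [q.1]) else cm) cm1) cm).keys
      = cm.keys ++ (L.filter (fun p => p.2 == "complex")).map (·.1) := by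
  induction L generalizing cm with
  | nil => simp
  | cons p L ih =>
    obtain ⟨a, b⟩ := p
    simp only [List.map_cons, List.nodup_cons] at hnd
    obtain ⟨hp, hnd'⟩ := hnd
    have hfa : cm.contains a = false := hfresh _ List.mem_cons_self
    have hfresh' : ∀ q ∈ L, cm.contains q.1 = false := fun q hq => hfresh q (List.mem_cons_of_mem _ hq)
    simp only [List.foldl_cons, List.filter_cons]
    by_cases hcplx : b = "complex"
    · subst hcplx
      simp only [bne_self_eq_false, Bool.false_eq_true, if_false]
      have hkeys1 : (cm.insert a ([] : List String)).keys = cm.keys ++ [a] :=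
        PySem.Dict.keys_insert_of_not_contains _ _ hfa
      have hcont1 : ∀ q ∈ L, (cm.insert a ([] : List String)).contains q.1 = false := by
        intro q hq
        rw [PySem.Dict.contains_insert]
        have : q.1 ≠ a := fun h => hp (h ▸ List.mem_map.mpr ⟨q, hq, rfl⟩)
        simp [this, hfresh' q hq]
      cases hrp : rp.get? a with
      | none =>
        simp only [hrp]
        rw [ih _ hnd' hcont1, hkeys1]
        simp
      | some d =>
        simp only [hrp]
        have hca : (cm.insert a ([] : List String)).contains a = true := by
          simp [PySem.Dict.contains_insert]
        rw [ih _ hnd' (by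
          intro q hq
          rw [L1c_AinnerContains _ _ _ _ hca]
          exact hcont1 q hq), L1k_AinnerKeys _ _ _ hca, hkeys1]
        simp
    · have hgate : ((a, b).2 != "complex") = true := by simp [hcplx]
      rw [if_pos hgate]
      have : ((a, b).2 == "complex") = false := by simp [hcplx]
      rw [this]
      simp only [Bool.false_eq_true, if_false]
      exact ih _ hnd' hfresh'

theorem L6_revInner (M : List (String × String)) (r : PySem.Dict String (PySem.Dict String String)) (i c : String)
    (hnd : (M.map (·.1)).Nodup) :
    (M.foldl (fun r q =>
      let r1 := if r.contains q.1 then r else r.insert q.1 PySem.Dict.empty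
      r1.insert q.1 ((r1.getD q.1 PySem.Dict.empty).insert i q.2)) r).get? c
      = ((PySem.Dict.mk M).get? c).elim (r.get? c) (fun v => some (((r.get? c).getD PySem.Dict.empty).insert i v)) := by
  induction M generalizing r with
  | nil => simp [PySem.Dict.get?]
  | cons q M ih =>
    obtain ⟨j, v⟩ := q
    simp only [List.map_cons, List.nodup_cons] at hnd
    obtain ⟨hj, hnd'⟩ := hnd
    simp only [List.foldl_cons]
    set r1 := if r.contains j then r else r.insert j PySem.Dict.empty with hr1
    have hr1get : r1.getD j PySem.Dict.empty = (r.get? j).getD PySem.Dict.empty := by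
      rw [hr1]
      split
      · rw [PySem.Dict.getD_eq_get?_getD]
      · next h =>
        rw [PySem.Dict.getD_insert_self]
        have : r.get? j = none := by
          rw [PySem.Dict.get?_eq_none_iff_not_mem_keys]
          intro hm
          rw [PySem.Dict.contains_eq_decide_mem_keys] at h
          simp [hm] at h
        rw [this]
        rfl
    by_cases hjc : j = c
    · subst hjc
      have hMc : (PySem.Dict.mk M).get? j = none := by
        rw [PySem.Dict.get?_eq_none_iff_not_mem_keys]
        exact hj
      rw [ih _ hnd', hMc, PySem.Dict.get?_mk_cons]
      simp only [BEq.rfl, if_true, Option.elim_none, Option.elim_some]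
      rw [PySem.Dict.get?_insert_self, hr1get]
    · have hbne : (j == c) = false := by simp [hjc]
      rw [ih _ hnd', PySem.Dict.get?_mk_cons, hbne]
      simp only [Bool.false_eq_true, if_false]
      have hstep : (r1.insert j ((r1.getD j PySem.Dict.empty).insert i v)).get? c = r.get? c := by
        rw [PySem.Dict.get?_insert_of_ne _ _ (fun h => hjc h.symm), hr1]
        split
        · rfl
        · exact PySem.Dict.get?_insert_of_ne _ _ (fun h => hjc h.symm)
      rw [hstep]

theorem L7_revOuter (L : List (String × PySem.Dict String String)) (r : PySem.Dict String (PySem.Dict String String)) (c : String)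
    (hnd : (L.map (·.1)).Nodup) (hv : ∀ p ∈ L, p.2.keys.Nodup)
    (hinv : ∀ d, r.get? c = some d → ∀ p ∈ L, d.contains p.1 = false) :
    pvOptItems ((L.foldl (fun r p =>
      p.2.items.foldl (fun r q =>
        let r1 := if r.contains q.1 then r else r.insert q.1 PySem.Dict.empty
        r1.insert q.1 ((r1.getD q.1 PySem.Dict.empty).insert p.1 q.2)) r) r).get? c)
      = pvOptItems (r.get? c) ++ L.filterMap (fun p => (p.2.get? c).map (fun v => (p.1, v))) := by
  induction L generalizing r with
  | nil => simp
  | cons p L ih =>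
    obtain ⟨i, di⟩ := p
    simp only [List.map_cons, List.nodup_cons] at hnd
    obtain ⟨hi, hnd'⟩ := hnd
    have hdin : di.keys.Nodup := hv _ List.mem_cons_self
    have hv' : ∀ p ∈ L, p.2.keys.Nodup := fun p hp => hv p (List.mem_cons_of_mem _ hp)
    simp only [List.foldl_cons, List.filterMap_cons]
    have hstep := L6_revInner di.items r i c hdin
    have hmkdi : PySem.Dict.mk di.items = di := rfl
    rw [hmkdi] at hstep
    cases hdic : di.get? c with
    | none =>
      rw [hdic, Option.elim_none] at hstep
      rw [ih _ hnd' hv' (fun d hd p hp => hinv d (hstep ▸ hd) p (List.mem_cons_of_mem _ hp)), hstep]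
      simp [hdic]
    | some v =>
      rw [hdic, Option.elim_some] at hstep
      have hnewitems : pvOptItems (some (((r.get? c).getD PySem.Dict.empty).insert i v))
          = pvOptItems (r.get? c) ++ [(i, v)] := by
        cases hrc : r.get? c with
        | none =>
          simp only [pvOptItems, Option.map_some, Option.getD_some, Option.map_none, Option.getD_none]
          rw [PySem.Dict.items_insert_of_not_contains _ _ (by rfl)]
          rfl
        | some d =>
          simp only [pvOptItems, Option.map_some, Option.getD_some]
          rw [PySem.Dict.items_insert_of_not_contains _ _ (hinv d hrc _ List.mem_cons_self)]
      have hinv' : ∀ d, (((r.get? c).getD PySem.Dict.empty).insert i v) = d → ∀ p ∈ L, d.contains p.1 = false := by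
        rintro d rfl p hp
        rw [PySem.Dict.contains_insert]
        have hne : p.1 ≠ i := fun h => hi (h ▸ List.mem_map.mpr ⟨p, hp, rfl⟩)
        have h1 : (p.1 == i) = false := by simp [hne]
        rw [h1, Bool.false_or]
        cases hrc : r.get? c with
        | none => simp [PySem.Dict.contains_empty]
        | some d' =>
          simp only [Option.getD_some]
          exact hinv d' hrc p (List.mem_cons_of_mem _ hp)
      rw [ih _ hnd' hv' (fun d hd p hp => hinv' d (Option.some.inj (hstep.symm.trans hd)) p hp), hstep, hnewitems,
        List.append_assoc]
      simp [hdic]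

theorem L8_fuse (L : List (String × PySem.Dict String String)) (c : String) :
    ((L.filterMap (fun p => (p.2.get? c).map (fun v => (p.1, v)))).filter (fun q => q.2 == "component>")).map (·.1)
      = pvSrcs L c := by
  induction L with
  | nil => rfl
  | cons p L ih =>
    simp only [pvSrcs, List.filterMap_cons, List.filter_cons] at *
    cases hg : p.2.get? c with
    | none => simpa [hg] using ih
    | some v =>
      by_cases hv : v = "component>"
      · subst hv
        simp [hg, ih]
      · simp [hg, hv, ih]

theorem L9_memValuesOfList {ν : Type} (m : List (String × ν)) (v : ν)
    (h : v ∈ (PySem.Dict.ofList m).values) : v ∈ m.map (·.2) := by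
  induction m using List.reverseRecOn with
  | nil => simp [PySem.Dict.ofList, PySem.Dict.update, PySem.Dict.empty, PySem.Dict.values] at h
  | append_singleton m p ih =>
    have : PySem.Dict.ofList (m ++ [p]) = (PySem.Dict.ofList m).insert p.1 p.2 := by
      simp [PySem.Dict.ofList, PySem.Dict.update, List.foldl_append]
    rw [this] at h
    rcases PySem.Dict.mem_values_insert _ _ _ _ h with rfl | h
    · simp
    · simp only [List.map_append]
      exact List.mem_append_left _ (ih h)

theorem L12_ofListItems {ν : Type} (l : List (String × ν)) (hnd : (l.map (·.1)).Nodup) :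
    (PySem.Dict.ofList l).items = l := by
  have h := PySem.Dict.items_foldl_insert_fresh l (fun p => p.1) (fun p => p.2) PySem.Dict.empty
    (fun a _ => PySem.Dict.contains_empty _) hnd
  simpa [PySem.Dict.ofList, PySem.Dict.update, PySem.Dict.empty] using h

theorem L10k_BinnerKeys (M : List (String × String)) (cm : PySem.Dict String (List String)) (i : String) :
    (M.foldl (fun cm q =>
      if q.2 == "component>" && cm.contains q.1 then cm.modify q.1 [] (fun xs => xs ++ [i]) else cm) cm).keys
      = cm.keys := by
  induction M generalizing cm with
  | nil => rfl
  | cons q M ih =>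
    simp only [List.foldl_cons]
    by_cases h : (q.2 == "component>" && cm.contains q.1) = true
    · rw [if_pos h, ih, PySem.Dict.keys_modify,
        PySem.Dict.keys_insert_of_contains _ _ ((Bool.and_eq_true _ _ |>.mp h).2)]
    · rw [if_neg h, ih]

theorem L10_BinnerGetD (M : List (String × String)) (cm : PySem.Dict String (List String)) (i c : String)
    (hnd : (M.map (·.1)).Nodup) :
    (M.foldl (fun cm q =>
      if q.2 == "component>" && cm.contains q.1 then cm.modify q.1 [] (fun xs => xs ++ [i]) else cm) cm).getD c []
      = cm.getD c [] ++ (if cm.contains c && ((PySem.Dict.mk M).get? c == some "component>") then [i] else []) := by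
  induction M generalizing cm with
  | nil => simp [PySem.Dict.get?]
  | cons q M ih =>
    obtain ⟨j, v⟩ := q
    simp only [List.map_cons, List.nodup_cons] at hnd
    obtain ⟨hj, hnd'⟩ := hnd
    simp only [List.foldl_cons, PySem.Dict.get?_mk_cons]
    by_cases hjc : j = c
    · subst hjc
      have hMc : (PySem.Dict.mk M).get? j = none := by
        rw [PySem.Dict.get?_eq_none_iff_not_mem_keys]; exact hj
      simp only [BEq.rfl, if_true]
      by_cases hcond : ((v == "component>") && cm.contains j) = true
      · obtain ⟨hv, hcont⟩ := Bool.and_eq_true _ _ |>.mp hcond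
        rw [if_pos hcond, ih _ hnd', hMc, PySem.Dict.getD_modify_self]
        have hcont' : (cm.modify j [] (fun xs => xs ++ [i])).contains j = true := by
          rw [PySem.Dict.contains_modify]; simp
        rw [hcont']
        simp only [Bool.true_and]
        have : ((none : Option (List String)).getD [] = []) := rfl
        simp [hcont, (beq_iff_eq.mp hv)]
      · rw [if_neg hcond, ih _ hnd', hMc]
        have h2 : (cm.contains j && ((some v : Option String) == some "component>")) = false := by
          rcases Bool.and_eq_false_iff.mp (Bool.not_eq_true _ |>.mp hcond) with h | h
          · simp only [Bool.and_eq_false_iff]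
            right
            simpa using h
          · simp [h]
        rw [h2]
        simp
    · have hbne : (j == c) = false := by simp [hjc]
      rw [hbne]
      simp only [Bool.false_eq_true, if_false]
      by_cases hcond : ((v == "component>") && cm.contains j) = true
      · rw [if_pos hcond, ih _ hnd']
        have hg : (cm.modify j [] (fun xs => xs ++ [i])).getD c [] = cm.getD c [] :=
          PySem.Dict.getD_modify_of_ne _ _ _ (fun h => hjc h.symm)
        have hcnt : (cm.modify j [] (fun xs => xs ++ [i])).contains c = cm.contains c := by
          rw [PySem.Dict.contains_modify]
          have hcj : (c == j) = false := by
            simp only [beq_eq_false_iff_ne, ne_eq]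
            exact fun h => hjc h.symm
          rw [hcj, Bool.false_or]
        rw [hg, hcnt]
      · rw [if_neg hcond, ih _ hnd']

theorem L11k_BouterKeys (L : List (String × PySem.Dict String String)) (cm : PySem.Dict String (List String)) :
    (L.foldl (fun cm p =>
      p.2.items.foldl (fun cm q =>
        if q.2 == "component>" && cm.contains q.1 then cm.modify q.1 [] (fun xs => xs ++ [p.1]) else cm) cm) cm).keys
      = cm.keys := by
  induction L generalizing cm with
  | nil => rfl
  | cons p L ih => rw [List.foldl_cons, ih, L10k_BinnerKeys]

theorem L11_BouterGetD (L : List (String × PySem.Dict String String)) (cm : PySem.Dict String (List String)) (c : String)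
    (hv : ∀ p ∈ L, p.2.keys.Nodup) :
    (L.foldl (fun cm p =>
      p.2.items.foldl (fun cm q =>
        if q.2 == "component>" && cm.contains q.1 then cm.modify q.1 [] (fun xs => xs ++ [p.1]) else cm) cm) cm).getD c []
      = cm.getD c [] ++ (if cm.contains c then pvSrcs L c else []) := by
  induction L generalizing cm with
  | nil => simp [pvSrcs]
  | cons p L ih =>
    have hdin : p.2.keys.Nodup := hv _ List.mem_cons_self
    have hv' : ∀ q ∈ L, q.2.keys.Nodup := fun q hq => hv q (List.mem_cons_of_mem _ hq)
    simp only [List.foldl_cons]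
    have hstep := L10_BinnerGetD p.2.items cm p.1 c hdin
    have hmk : PySem.Dict.mk p.2.items = p.2 := rfl
    rw [hmk] at hstep
    have hcont : ∀ c', (p.2.items.foldl (fun cm q =>
        if q.2 == "component>" && cm.contains q.1 then cm.modify q.1 [] (fun xs => xs ++ [p.1]) else cm) cm).contains c'
        = cm.contains c' := by
      intro c'
      rw [PySem.Dict.contains_eq_decide_mem_keys, PySem.Dict.contains_eq_decide_mem_keys, L10k_BinnerKeys]
    rw [ih _ hv', hstep, hcont]
    by_cases hc : cm.contains c = true
    · by_cases hg : (p.2.get? c == some "component>") = true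
      · simp [pvSrcs, hc, hg, List.filter_cons]
      · simp [pvSrcs, hc, Bool.not_eq_true _ |>.mp hg, List.filter_cons]
    · simp [Bool.not_eq_true _ |>.mp hc]

theorem pv_main (pNodes : List (String × String)) (pInteractions : List (String × List (String × String))) :
    getComponentMap pNodes pInteractions = getComponentMap_alt pNodes pInteractions := by
  simp only [getComponentMap, getComponentMap_alt, reverseInteractions]
  set pN : PySem.Dict String String := PySem.Dict.ofList pNodes with hpN
  set pI : PySem.Dict String (PySem.Dict String String) :=
    PySem.Dict.ofList (pInteractions.map (fun p => (p.1, PySem.Dict.ofList p.2))) with hpI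
  have hNnd : (pN.items.map (·.1)).Nodup := PySem.Dict.nodup_keys_ofList _
  have hLnd : (pI.items.map (·.1)).Nodup := PySem.Dict.nodup_keys_ofList _
  have hv : ∀ p ∈ pI.items, p.2.keys.Nodup := by
    intro p hp
    have hval : p.2 ∈ (pInteractions.map (fun p => (p.1, PySem.Dict.ofList p.2))).map (·.2) :=
      L9_memValuesOfList _ _ (List.mem_map.mpr ⟨p, hp, rfl⟩)
    rw [List.map_map] at hval
    obtain ⟨q, _, hq⟩ := List.mem_map.mp hval
    rw [← hq]
    exact PySem.Dict.nodup_keys_ofList _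
  have hCnd : (((pN.items.filter (fun p => p.2 == "complex")).map (·.1)) : List String).Nodup :=
    hNnd.sublist (List.Sublist.map _ List.filter_sublist)
  -- the two result dictionaries
  set cmA := pN.items.foldl (fun cm p =>
    if p.2 != "complex" then cm
    else
      let cm1 := cm.insert p.1 ([] : List String)
      match (pI.items.foldl (fun r p =>
        p.2.items.foldl (fun r q =>
          let r1 := if r.contains q.1 then r else r.insert q.1 PySem.Dict.empty
          r1.insert q.1 ((r1.getD q.1 PySem.Dict.empty).insert p.1 q.2)) r) PySem.Dict.empty).get? p.1 with
      | none => cm1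
      | some d => d.items.foldl (fun cm q =>
          if q.2 == "component>" then cm.modify p.1 [] (fun xs => xs ++ [q.1]) else cm) cm1)
    (PySem.Dict.empty : PySem.Dict String (List String)) with hcmA
  set cm0 : PySem.Dict String (List String) :=
    PySem.Dict.ofList ((pN.items.filter (fun p => p.2 == "complex")).map (fun p => (p.1, ([] : List String)))) with hcm0
  set cmB := pI.items.foldl (fun cm p =>
    p.2.items.foldl (fun cm q =>
      if q.2 == "component>" && cm.contains q.1 then cm.modify q.1 [] (fun xs => xs ++ [p.1]) else cm) cm) cm0 with hcmB
  have hinitnd : ((((pN.items.filter (fun p => p.2 == "complex")).map (fun p => (p.1, ([] : List String)))).map (·.1)).Nodup) := by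
    rw [List.map_map]
    exact hCnd
  have hInit : cm0.items = (pN.items.filter (fun p => p.2 == "complex")).map (fun p => (p.1, ([] : List String))) :=
    L12_ofListItems _ hinitnd
  -- keys of both sides
  have hAkeys : cmA.keys = (pN.items.filter (fun p => p.2 == "complex")).map (·.1) := by
    rw [hcmA, L5_AouterKeys _ _ _ hNnd (fun p _ => PySem.Dict.contains_empty _)]
    simp [PySem.Dict.keys_empty]
  have hBkeys : cmB.keys = (pN.items.filter (fun p => p.2 == "complex")).map (·.1) := by
    rw [hcmB, L11k_BouterKeys]
    show cm0.items.map (·.1) = _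
    rw [hInit, List.map_map]
    rfl
  -- values at complex keys
  have hAgetD : ∀ c ∈ (pN.items.filter (fun p => p.2 == "complex")).map (·.1), cmA.getD c [] = pvSrcs pI.items c := by
    intro c hcmem
    obtain ⟨p, hpf, hp1⟩ := List.mem_map.mp hcmem
    have hpc : (c, "complex") ∈ pN.items := by
      have h2 := List.of_mem_filter hpf
      have h2' : p.2 = "complex" := by simpa using h2
      have := List.mem_of_mem_filter hpf
      rwa [show (c, "complex") = p by rw [← hp1, ← h2']]
    rw [hcmA, L4_AouterGetD _ _ _ _ hNnd (PySem.Dict.contains_empty _), if_pos hpc]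
    -- pvRpSrcs of the reverse map equals pvSrcs
    have hrev := L7_revOuter pI.items PySem.Dict.empty c hLnd hv
      (fun d hd => by rw [PySem.Dict.get?_empty] at hd; cases hd)
    rw [PySem.Dict.get?_empty] at hrev
    simp only [pvOptItems, Option.map_none, Option.getD_none, List.nil_append] at hrev
    rw [pvRpSrcs]
    cases hrp : (pI.items.foldl (fun r p =>
      p.2.items.foldl (fun r q =>
        let r1 := if r.contains q.1 then r else r.insert q.1 PySem.Dict.empty
        r1.insert q.1 ((r1.getD q.1 PySem.Dict.empty).insert p.1 q.2)) r) PySem.Dict.empty).get? c with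
    | none =>
      rw [hrp] at hrev
      simp only [pvOptItems, Option.map_none, Option.getD_none] at hrev
      rw [← L8_fuse pI.items c, ← hrev]
      simp
    | some d =>
      rw [hrp] at hrev
      simp only [pvOptItems, Option.map_some, Option.getD_some] at hrev
      simp only
      rw [← L8_fuse pI.items c, ← hrev]
  have hBgetD : ∀ c ∈ (pN.items.filter (fun p => p.2 == "complex")).map (·.1), cmB.getD c [] = pvSrcs pI.items c := by
    intro c hcmem
    have hc0 : (c, ([] : List String)) ∈ cm0.items := by
      rw [hInit]
      obtain ⟨p, hpf, hp1⟩ := List.mem_map.mp hcmem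
      exact List.mem_map.mpr ⟨p, hpf, by rw [hp1]⟩
    have hc0nd : cm0.keys.Nodup := PySem.Dict.nodup_keys_ofList _
    have hget0 : cm0.getD c [] = [] := PySem.Dict.getD_of_mem_items _ hc0 hc0nd _
    have hcont0 : cm0.contains c = true := by
      rw [PySem.Dict.contains_eq_decide_mem_keys]
      simp only [decide_eq_true_eq]
      exact List.mem_map.mpr ⟨(c, []), hc0, rfl⟩
    rw [hcmB, L11_BouterGetD _ _ _ hv, hget0, hcont0]
    simp
  -- assemble via items_eq_map_keys
  rw [PySem.Dict.items_eq_map_keys cmA (by rw [hAkeys]; exact hCnd) [],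
    PySem.Dict.items_eq_map_keys cmB (by rw [hBkeys]; exact hCnd) [],
    hAkeys, hBkeys]
  apply List.map_congr_left
  intro k hk
  rw [hAgetD k hk, hBgetD k hk]

-- ===== VERDICT (by name: the statement is the Claim_ definition above) =====
theorem getComponentMap_spec : Claim_equal_getComponentMap := by
  intro pNodes pInteractions _
  unfold Spec_getComponentMap
  exact pv_main pNodes pInteractions
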